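-- pv_equiv track=rewrite | github.com/loopsleasing-png/quantum-cracker | scripts/experiment/weil_descent_ghs.py | ghs_genus_bound
-- ===== SOURCE A (Python) =====
-- def ghs_genus_bound(n, q=2):
--     """Compute the genus bound for GHS Weil descent.
--
--     For E/F_{q^n} with the GHS attack:
--     - If n is odd: genus g <= 2^{(n-1)/2}
--     - If n is even: genus g <= 2^{n/2 - 1}  (slightly better)
--     - For composite n = n1*n2: can do partial descent F_{q^n} -> F_{q^{n1}},
--       getting genus ~ 2^{(n2-1)/2} which may be much smaller.
--
--     Returns (worst_case_genus, best_composite_genus, factorizations).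
--     """
--     if n <= 1:
--         return 1, 1, []
--
--     # Worst case genus (full descent to base field)
--     if n % 2 == 0:
--         worst_genus = 1 << (n // 2 - 1)
--     else:
--         worst_genus = 1 << ((n - 1) // 2)
--
--     # For composite n, try all factorizations
--     factorizations = []
--     best_genus = worst_genus
--
--     for d in range(2, n):
--         if n % d == 0:
--             n1 = d
--             n2 = n // d
--             # Partial descent: E/F_{2^n} -> C/F_{2^{n1}}
--             # Genus of resulting curve over F_{2^{n1}}
--             if n2 % 2 == 0:
--                 partial_genus = 1 << (n2 // 2 - 1)
--             else:
--                 partial_genus = 1 << ((n2 - 1) // 2)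
--
--             factorizations.append((n1, n2, partial_genus))
--             if partial_genus < best_genus:
--                 best_genus = partial_genus
--
--     return worst_genus, best_genus, factorizations
-- ===== SOURCE B (Python) =====
-- def ghs_genus_bound(n, q=2):
--     """Same result as A, but finds divisors by trial division up to sqrt(n):
--     O(sqrt(n)) instead of A's O(n) scan."""
--     if n <= 1:
--         return 1, 1, []
--
--     def g(m):
--         return 1 << (m // 2 - 1) if m % 2 == 0 else 1 << ((m - 1) // 2)
--
--     worst = g(n)
--
--     lows = []
--     highs = []
--     d = 2
--     while d * d <= n:
--         if n % d == 0:
--             lows.append(d)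
--             if d != n // d:
--                 highs.append(n // d)
--         d += 1
--
--     divisors = lows + highs[::-1]
--     factorizations = [(d, n // d, g(n // d)) for d in divisors]
--     best = min([worst] + [t[2] for t in factorizations])
--     return worst, best, factorizations
-- ===== Notes on version B (the rewrite author's own statement) =====
-- stated objective: faster
-- what changed: B finds the nontrivial divisors by trial division up to sqrt(n), collecting small divisors ascending and their cofactors, then concatenates the reversed cofactor list, instead of A's scan of every d in range(2, n); best genus is taken as a min over the built list.
import Mathlib
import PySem

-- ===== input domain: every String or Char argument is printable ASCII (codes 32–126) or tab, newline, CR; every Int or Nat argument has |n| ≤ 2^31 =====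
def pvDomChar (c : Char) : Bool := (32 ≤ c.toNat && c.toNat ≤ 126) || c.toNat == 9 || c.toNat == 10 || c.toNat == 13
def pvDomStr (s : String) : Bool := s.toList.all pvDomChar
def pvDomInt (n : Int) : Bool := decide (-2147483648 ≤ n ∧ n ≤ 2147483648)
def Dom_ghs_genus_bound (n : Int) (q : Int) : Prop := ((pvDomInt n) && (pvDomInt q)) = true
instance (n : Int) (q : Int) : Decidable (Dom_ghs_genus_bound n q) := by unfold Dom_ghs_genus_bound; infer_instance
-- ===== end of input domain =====

-- B replaces A's O(n) scan of range(2, n) by trial division up to sqrt(n) (objective: faster).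

-- ===== PORT A =====
-- A scans every d in range(2, n), appending factorizations and tracking best_genus.
def ghs_genus_bound (n : Int) (q : Int) : Int × Int × (List (Int × Int × Int)) :=
  if n ≤ 1 then (1, 1, [])
  else
    let worst_genus : Int :=
      if PySem.Int.mod n 2 = 0 then 2 ^ (PySem.Int.floordiv n 2 - 1).toNat
      else 2 ^ (PySem.Int.floordiv (n - 1) 2).toNat
    let st :=
      (PySem.List.pyRange 2 n 1).foldl
        (fun (acc : List (Int × Int × Int) × Int) d =>
          if PySem.Int.mod n d = 0 then
            let n1 := d
            let n2 := PySem.Int.floordiv n d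
            let partial_genus : Int :=
              if PySem.Int.mod n2 2 = 0 then 2 ^ (PySem.Int.floordiv n2 2 - 1).toNat
              else 2 ^ (PySem.Int.floordiv (n2 - 1) 2).toNat
            (acc.1 ++ [(n1, n2, partial_genus)],
             if partial_genus < acc.2 then partial_genus else acc.2)
          else acc)
        ([], worst_genus)
    (worst_genus, st.2, st.1)

-- ===== PORT B =====
-- helper g of Source B
def pvG (m : Int) : Int :=
  if PySem.Int.mod m 2 = 0 then 2 ^ (PySem.Int.floordiv m 2 - 1).toNat
  else 2 ^ (PySem.Int.floordiv (m - 1) 2).toNat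

-- the while loop of Source B (d*d <= n, collecting (lows, highs)), as structural
-- recursion on a fuel that bounds the number of iterations: when the fuel
-- reaches 0 the guard d*d <= n is already false, so the fuel never truncates
def pvLoopFuel (fuel : Nat) (n : Int) (d : Int) : List Int × List Int :=
  match fuel with
  | 0 => ([], [])
  | fuel + 1 =>
    if d * d ≤ n then
      let rest := pvLoopFuel fuel n (d + 1)
      if PySem.Int.mod n d = 0 then
        if d ≠ PySem.Int.floordiv n d then
          (d :: rest.1, PySem.Int.floordiv n d :: rest.2)
        else (d :: rest.1, rest.2)
      else rest
    else ([], [])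

def pvLoop (n : Int) (d : Int) : List Int × List Int :=
  pvLoopFuel (n + 1 - d).toNat n d

def ghs_genus_bound_alt (n : Int) (q : Int) : Int × Int × (List (Int × Int × Int)) :=
  if n ≤ 1 then (1, 1, [])
  else
    let worst := pvG n
    let lh := pvLoop n 2
    let divisors := lh.1 ++ lh.2.reverse
    let factorizations := divisors.map (fun d =>
      (d, PySem.Int.floordiv n d, pvG (PySem.Int.floordiv n d)))
    let best := (factorizations.map (·.2.2)).foldl min worst
    (worst, best, factorizations)

-- ===== PRECONDITION & SPEC =====
def Spec_ghs_genus_bound (n : Int) (q : Int) (out : Int × Int × (List (Int × Int × Int))) : Prop := out = ghs_genus_bound_alt n q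
instance (n : Int) (q : Int) (out : Int × Int × (List (Int × Int × Int))) : Decidable (Spec_ghs_genus_bound n q out) := by unfold Spec_ghs_genus_bound; infer_instance

-- ===== CLAIM (what is proved, stated in full; the proofs are below) =====
def Claim_equal_ghs_genus_bound : Prop := ∀ (n : Int) (q : Int), Dom_ghs_genus_bound n q → Spec_ghs_genus_bound n q (ghs_genus_bound n q)

-- ===== LEMMAS AND PROOFS =====

-- membership in the lows list of B's trial-division loop
theorem pvLoopFuel_fst_mem (n : Int) : ∀ (f : Nat) (d x : Int), 0 < d →
    (n + 1 - d).toNat ≤ f →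
    (x ∈ (pvLoopFuel f n d).1 ↔ d ≤ x ∧ x * x ≤ n ∧ PySem.Int.mod n x = 0) := by
  intro f
  induction f with
  | zero =>
    intro d x hd hf
    simp only [pvLoopFuel, List.not_mem_nil, false_iff]
    rintro ⟨h1, h2, h3⟩
    have hx1 : 1 ≤ x := by omega
    have : x ≤ x * x := le_mul_of_one_le_left (by omega) hx1
    omega
  | succ f ih =>
    intro d x hd hf
    simp only [pvLoopFuel]
    by_cases h : d * d ≤ n
    · rw [if_pos h]
      have hrec := ih (d + 1) x (by omega) (by omega)
      by_cases hmod : PySem.Int.mod n d = 0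
      · have hcons : x ∈ d :: (pvLoopFuel f n (d + 1)).1 ↔
            d ≤ x ∧ x * x ≤ n ∧ PySem.Int.mod n x = 0 := by
          simp only [List.mem_cons]
          rw [hrec]
          constructor
          · rintro (rfl | ⟨h1, h2, h3⟩)
            · exact ⟨le_refl _, h, hmod⟩
            · exact ⟨by omega, h2, h3⟩
          · rintro ⟨h1, h2, h3⟩
            by_cases hx : x = d
            · exact Or.inl hx
            · exact Or.inr ⟨by omega, h2, h3⟩
        rw [if_pos hmod]
        by_cases hne : d ≠ PySem.Int.floordiv n d
        · rw [if_pos hne]; exact hcons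
        · rw [if_neg hne]; exact hcons
      · rw [if_neg hmod]
        rw [hrec]
        constructor
        · rintro ⟨h1, h2, h3⟩
          exact ⟨by omega, h2, h3⟩
        · rintro ⟨h1, h2, h3⟩
          refine ⟨?_, h2, h3⟩
          rcases eq_or_lt_of_le h1 with rfl | h4
          · exact absurd h3 (by simpa using hmod)
          · omega
    · rw [if_neg h]
      simp only [List.not_mem_nil, false_iff]
      rintro ⟨h1, h2, h3⟩
      have : d * d ≤ x * x := by nlinarith
      omega

theorem pvLoop_fst_mem (n d x : Int) :
    0 < d → (x ∈ (pvLoop n d).1 ↔ d ≤ x ∧ x * x ≤ n ∧ PySem.Int.mod n x = 0) := by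
  intro hd
  exact pvLoopFuel_fst_mem n (n + 1 - d).toNat d x hd (le_refl _)

-- the highs list is the image of the lows that are not their own cofactor
theorem pvLoopFuel_snd_eq (n : Int) : ∀ (f : Nat) (d : Int),
    (pvLoopFuel f n d).2 =
      ((pvLoopFuel f n d).1.filter (fun k => decide (k ≠ PySem.Int.floordiv n k))).map
        (fun k => PySem.Int.floordiv n k) := by
  intro f
  induction f with
  | zero => intro d; rfl
  | succ f ih =>
    intro d
    simp only [pvLoopFuel]
    by_cases h : d * d ≤ n
    · rw [if_pos h]
      by_cases hmod : PySem.Int.mod n d = 0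
      · rw [if_pos hmod]
        by_cases hne : d ≠ PySem.Int.floordiv n d
        · rw [if_pos hne]
          rw [List.filter_cons_of_pos (by simpa using hne), List.map_cons, ← ih]
        · rw [if_neg hne]
          rw [List.filter_cons_of_neg (by simpa using hne), ← ih]
      · rw [if_neg hmod]
        exact ih (d + 1)
    · rw [if_neg h]; rfl

theorem pvLoop_snd_eq (n d : Int) :
    (pvLoop n d).2 =
      ((pvLoop n d).1.filter (fun k => decide (k ≠ PySem.Int.floordiv n k))).map
        (fun k => PySem.Int.floordiv n k) :=
  pvLoopFuel_snd_eq n (n + 1 - d).toNat d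

-- the lows list is strictly increasing
theorem pvLoopFuel_fst_pairwise (n : Int) : ∀ (f : Nat) (d : Int), 0 < d →
    (n + 1 - d).toNat ≤ f → ((pvLoopFuel f n d).1).Pairwise (· < ·) := by
  intro f
  induction f with
  | zero => intro d hd hf; exact List.Pairwise.nil
  | succ f ih =>
    intro d hd hf
    simp only [pvLoopFuel]
    by_cases h : d * d ≤ n
    · rw [if_pos h]
      have hpw := ih (d + 1) (by omega) (by omega)
      have hhead : ∀ x ∈ (pvLoopFuel f n (d + 1)).1, d < x := by
        intro x hx
        have := (pvLoopFuel_fst_mem n f (d + 1) x (by omega) (by omega)).1 hx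
        omega
      by_cases hmod : PySem.Int.mod n d = 0
      · rw [if_pos hmod]
        by_cases hne : d ≠ PySem.Int.floordiv n d
        · rw [if_pos hne]; exact List.pairwise_cons.2 ⟨hhead, hpw⟩
        · rw [if_neg hne]; exact List.pairwise_cons.2 ⟨hhead, hpw⟩
      · rw [if_neg hmod]; exact hpw
    · rw [if_neg h]; exact List.Pairwise.nil

theorem pvLoop_fst_pairwise (n d : Int) :
    0 < d → ((pvLoop n d).1).Pairwise (· < ·) := by
  intro hd
  exact pvLoopFuel_fst_pairwise n (n + 1 - d).toNat d hd (le_refl _)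

-- basic facts about an exact small divisor k of n (2 <= k, k*k <= n, k | n)
theorem pvCofactor_facts (n k : Int) (h2 : 2 ≤ k) (hk : k * k ≤ n) (hdvd : k ∣ n) :
    (n / k) * k = n ∧ k ≤ n / k ∧ 2 ≤ n / k ∧ n / k < n := by
  have hk0 : 0 < k := by omega
  have hmul : n / k * k = n := Int.ediv_mul_cancel hdvd
  have hky : k ≤ n / k := by
    rw [Int.le_ediv_iff_mul_le hk0]; exact hk
  have hlt : n / k < n := by nlinarith
  exact ⟨hmul, hky, by omega, hlt⟩

-- the cofactor n/k of a small divisor k (with k ≠ n/k) is a large divisor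
theorem pvBig_facts (n k : Int) (h2 : 2 ≤ k) (hk : k * k ≤ n) (hdvd : k ∣ n)
    (hne : k ≠ n / k) :
    2 ≤ n / k ∧ (n / k) ∣ n ∧ n < (n / k) * (n / k) ∧ n / k < n := by
  obtain ⟨hmul, hky, hy2, hyn⟩ := pvCofactor_facts n k h2 hk hdvd
  have hklt : k < n / k := lt_of_le_of_ne hky hne
  refine ⟨hy2, ⟨k, by omega⟩, by nlinarith, hyn⟩

-- a large divisor x of n is the cofactor of the small divisor n/x
theorem pvSmall_of_big (n x : Int) (h2 : 2 ≤ x) (hxn : x < n) (hdvd : x ∣ n)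
    (hxx : ¬ x * x ≤ n) :
    2 ≤ n / x ∧ (n / x) * (n / x) ≤ n ∧ (n / x) ∣ n ∧ n / x ≠ x ∧ n / (n / x) = x := by
  have hx0 : 0 < x := by omega
  have hmul : n / x * x = n := Int.ediv_mul_cancel hdvd
  have hk1 : 1 ≤ n / x := by nlinarith
  have hk2 : 2 ≤ n / x := by
    rcases eq_or_lt_of_le hk1 with h1 | h1
    · exfalso
      have := hmul
      rw [← h1] at this
      omega
    · omega
  have hkx : n / x < x := by nlinarith
  have hkk : (n / x) * (n / x) ≤ n := by nlinarith
  have hne0 : n / x ≠ 0 := by omega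
  have hcan : n / (n / x) = x := by
    have hdvd2 : (n / x) ∣ n := ⟨x, by omega⟩
    have h1 : n / (n / x) * (n / x) = x * (n / x) := by
      rw [Int.ediv_mul_cancel hdvd2, mul_comm]
      omega
    exact mul_right_cancel₀ hne0 h1
  exact ⟨hk2, hkk, ⟨x, by omega⟩, by omega, hcan⟩

-- the two divisor enumerations coincide (main combinatorial lemma)
theorem pvDivs_eq (n : Int) (hn : 1 < n) :
    (PySem.List.pyRange 2 n 1).filter (fun d => decide (PySem.Int.mod n d = 0)) =
      (pvLoop n 2).1 ++ ((pvLoop n 2).2).reverse := by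
  have memL : ∀ x, x ∈ (pvLoop n 2).1 ↔ 2 ≤ x ∧ x * x ≤ n ∧ x ∣ n := by
    intro x
    rw [pvLoop_fst_mem n 2 x (by omega), PySem.Int.mod_eq_zero_iff_dvd]
  have memH : ∀ x, x ∈ (pvLoop n 2).2 ↔
      ∃ k, (k ∈ (pvLoop n 2).1 ∧ k ≠ n / k) ∧ x = n / k := by
    intro x
    rw [pvLoop_snd_eq]
    simp only [List.mem_map, List.mem_filter, decide_eq_true_eq]
    constructor
    · rintro ⟨k, ⟨hkL, hkne⟩, rfl⟩
      have hk2 : 2 ≤ k := ((memL k).1 hkL).1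
      rw [PySem.Int.floordiv_eq_ediv_of_pos (by omega)] at hkne ⊢
      exact ⟨k, ⟨hkL, hkne⟩, rfl⟩
    · rintro ⟨k, ⟨hkL, hkne⟩, rfl⟩
      have hk2 : 2 ≤ k := ((memL k).1 hkL).1
      refine ⟨k, ⟨hkL, ?_⟩, ?_⟩ <;>
        rw [PySem.Int.floordiv_eq_ediv_of_pos (by omega)]
      exact hkne
  have hPL : ((pvLoop n 2).1).Pairwise (· < ·) := pvLoop_fst_pairwise n 2 (by omega)
  have hPH : ((pvLoop n 2).2).Pairwise (fun a b => b < a) := by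
    rw [pvLoop_snd_eq, List.pairwise_map]
    refine List.Pairwise.imp_of_mem ?_ (hPL.filter _)
    intro a b ha hb hab
    have haL := (memL a).1 (List.mem_of_mem_filter ha)
    have hbL := (memL b).1 (List.mem_of_mem_filter hb)
    obtain ⟨ha2, haa, hadvd⟩ := haL
    obtain ⟨hb2, hbb, hbdvd⟩ := hbL
    rw [PySem.Int.floordiv_eq_ediv_of_pos (by omega : (0:Int) < a),
        PySem.Int.floordiv_eq_ediv_of_pos (by omega : (0:Int) < b)]
    have hma : n / a * a = n := Int.ediv_mul_cancel hadvd
    have hmb : n / b * b = n := Int.ediv_mul_cancel hbdvd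
    have hb1 : 1 ≤ n / b := by nlinarith
    by_contra hcon
    push Not at hcon
    nlinarith
  have hcross : ∀ x ∈ (pvLoop n 2).1, ∀ y ∈ ((pvLoop n 2).2).reverse, x < y := by
    intro x hx y hy
    rw [List.mem_reverse] at hy
    obtain ⟨hx2, hxx, _⟩ := (memL x).1 hx
    obtain ⟨k, ⟨hkL, hkne⟩, rfl⟩ := (memH y).1 hy
    obtain ⟨hk2, hkk, hkdvd⟩ := (memL k).1 hkL
    obtain ⟨hy2, _, hyy, _⟩ := pvBig_facts n k hk2 hkk hkdvd hkne
    nlinarith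
  have hPR : ((pvLoop n 2).1 ++ ((pvLoop n 2).2).reverse).Pairwise (· < ·) := by
    rw [List.pairwise_append]
    exact ⟨hPL, List.pairwise_reverse.2 hPH, hcross⟩
  have hP1 : ((PySem.List.pyRange 2 n 1).filter
      (fun d => decide (PySem.Int.mod n d = 0))).Pairwise (· < ·) :=
    (PySem.List.pairwise_lt_pyRange_one 2 n).filter _
  have hiff : ∀ x,
      (x ∈ (PySem.List.pyRange 2 n 1).filter (fun d => decide (PySem.Int.mod n d = 0)) ↔
       x ∈ (pvLoop n 2).1 ++ ((pvLoop n 2).2).reverse) := by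
    intro x
    rw [List.mem_filter, List.mem_append, List.mem_reverse, memL x, memH x,
        PySem.List.mem_pyRange_one]
    simp only [decide_eq_true_eq, PySem.Int.mod_eq_zero_iff_dvd]
    constructor
    · rintro ⟨⟨hx2, hxn⟩, hdvd⟩
      by_cases hxx : x * x ≤ n
      · exact Or.inl ⟨hx2, hxx, hdvd⟩
      · obtain ⟨hk2, hkk, hkdvd, hkne, hcan⟩ := pvSmall_of_big n x hx2 hxn hdvd hxx
        refine Or.inr ⟨n / x, ⟨(memL _).2 ⟨hk2, hkk, hkdvd⟩, ?_⟩, hcan.symm⟩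
        rw [hcan]
        exact hkne
    · rintro (⟨hx2, hxx, hdvd⟩ | ⟨k, ⟨hkL, hkne⟩, rfl⟩)
      · refine ⟨⟨hx2, ?_⟩, hdvd⟩
        nlinarith
      · obtain ⟨hk2, hkk, hkdvd⟩ := (memL k).1 hkL
        obtain ⟨hy2, hydvd, _, hyn⟩ := pvBig_facts n k hk2 hkk hkdvd hkne
        exact ⟨⟨hy2, hyn⟩, hydvd⟩
  have hperm : ((PySem.List.pyRange 2 n 1).filter
      (fun d => decide (PySem.Int.mod n d = 0))).Perm
      ((pvLoop n 2).1 ++ ((pvLoop n 2).2).reverse) :=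
    (List.perm_ext_iff_of_nodup (hP1.imp ne_of_lt) (hPR.imp ne_of_lt)).2 hiff
  exact hperm.eq_of_pairwise (fun a b _ _ h1 h2 => le_antisymm h1 h2)
    (hP1.imp le_of_lt) (hPR.imp le_of_lt)

-- A's loop as a filter/map/fold over the scanned range
theorem pvFoldA_eq (n : Int) (l : List Int) (acc : List (Int × Int × Int)) (b : Int) :
    l.foldl
      (fun (acc : List (Int × Int × Int) × Int) d =>
        if PySem.Int.mod n d = 0 then
          let n1 := d
          let n2 := PySem.Int.floordiv n d
          let partial_genus : Int :=
            if PySem.Int.mod n2 2 = 0 then 2 ^ (PySem.Int.floordiv n2 2 - 1).toNat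
            else 2 ^ (PySem.Int.floordiv (n2 - 1) 2).toNat
          (acc.1 ++ [(n1, n2, partial_genus)],
           if partial_genus < acc.2 then partial_genus else acc.2)
        else acc)
      (acc, b) =
    (acc ++ (l.filter (fun d => decide (PySem.Int.mod n d = 0))).map
        (fun d => (d, PySem.Int.floordiv n d, pvG (PySem.Int.floordiv n d))),
     ((l.filter (fun d => decide (PySem.Int.mod n d = 0))).foldl
        (fun b d => min b (pvG (PySem.Int.floordiv n d))) b)) := by
  induction l generalizing acc b with
  | nil => simp
  | cons x xs ih =>
    simp only [List.foldl_cons, List.filter_cons]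
    by_cases hx : PySem.Int.mod n x = 0
    · simp only [hx, if_true, decide_true, ih, List.map_cons, List.foldl_cons]
      refine Prod.ext ?_ ?_
      · simp [pvG]
      · show List.foldl _ _ _ = List.foldl _ _ _
        congr 1
        simp only [pvG]
        generalize (if PySem.Int.mod (PySem.Int.floordiv n x) 2 = 0 then
            (2:Int) ^ (PySem.Int.floordiv (PySem.Int.floordiv n x) 2 - 1).toNat
          else (2:Int) ^ (PySem.Int.floordiv (PySem.Int.floordiv n x - 1) 2).toNat) = p
        omega
    · rw [if_neg hx, if_neg (by simp [hx])]
      exact ih acc b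

-- ===== VERDICT (by name: the statement is the Claim_ definition above) =====
theorem ghs_genus_bound_spec : Claim_equal_ghs_genus_bound := by
  intro n q _
  unfold Spec_ghs_genus_bound ghs_genus_bound ghs_genus_bound_alt
  by_cases hn : n ≤ 1
  · simp [hn]
  · simp only [hn, if_false]
    rw [pvFoldA_eq]
    rw [pvDivs_eq n (by omega)]
    refine Prod.ext rfl (Prod.ext ?_ ?_)
    · show List.foldl _ _ _ = List.foldl _ _ _
      rw [List.map_map, List.foldl_map]
      rfl
    · rfl
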